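-- pv_equiv track=rewrite | github.com/jaimiles23/HackerRank_Solutions | python/03_strings/10_stringformatting.py | convert_int_to_form
-- ===== SOURCE A (Python) =====
-- def convert_int_to_form(num: int, form_num: int) -> int:
--     """Converts decimal integer to specified form number.
--
--     Supports conversion to octal and binary forms.
--     """
--     output = 0
--     bin_digits = []
--
--     while num > 0:
--         num, r = divmod(num , form_num)
--         bin_digits.insert(0, r)
--
--     num_digits = len(bin_digits) - 1
--     for i in range(num_digits + 1):
--         digit = bin_digits[i] * 10 ** (num_digits - i)
--         output += digit
--     return str(output)
-- ===== SOURCE B (Python) =====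
-- def convert_int_to_form(num: int, form_num: int) -> int:
--     """Single forward pass: accumulate each remainder at its decimal place."""
--     output = 0
--     place = 1
--     while num > 0:
--         num, r = divmod(num, form_num)
--         output += r * place
--         place *= 10
--     return str(output)
-- ===== Notes on version B (the rewrite author's own statement) =====
-- stated objective: simpler
-- what changed: one forward accumulation loop (output += remainder*place, place *= 10) replaces A's two-pass scheme of building a digit list front-insertion-first and then re-weighting it by 10**(n-i) in a second indexed loop
import Mathlib
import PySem

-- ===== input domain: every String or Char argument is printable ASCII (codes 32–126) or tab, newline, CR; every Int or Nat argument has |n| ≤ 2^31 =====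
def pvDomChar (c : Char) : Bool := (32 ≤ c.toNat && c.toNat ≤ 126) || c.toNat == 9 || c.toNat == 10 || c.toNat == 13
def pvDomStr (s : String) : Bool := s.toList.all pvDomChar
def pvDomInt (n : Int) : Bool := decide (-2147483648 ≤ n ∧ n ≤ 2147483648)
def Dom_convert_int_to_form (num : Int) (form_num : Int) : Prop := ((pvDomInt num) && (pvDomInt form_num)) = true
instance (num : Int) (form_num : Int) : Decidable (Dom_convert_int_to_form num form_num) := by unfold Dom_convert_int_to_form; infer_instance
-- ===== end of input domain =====

-- B replaces A's two passes (build a digit list by front insertion, then weight it by 10^(n-i))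
-- with a single accumulation loop carrying output and a running decimal place; equal return values proved below.

-- ===== PORT A =====
-- A's while-loop: 'while num > 0: num, r = divmod(num, form_num); bin_digits.insert(0, r)'.
-- Fuel num.toNat + 1 suffices on Pre_ (form_num ∉ {0,1} makes num strictly shrink toward ≤ 0);
-- both ports use the same fuel and the same recursion, so the proof needs no fuel-sufficiency argument.
def pvLoopA (b : Int) : Nat → Int → List Int → List Int
  | 0, _, lst => lst
  | fuel + 1, num, lst =>
    if num > 0 then pvLoopA b fuel (Int.fdiv num b) (Int.fmod num b :: lst) else lst

def convert_int_to_form (num : Int) (form_num : Int) : String :=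
  -- output = 0; bin_digits = []; while-loop
  let bin_digits := pvLoopA form_num (num.toNat + 1) num []
  let num_digits : Int := (bin_digits.length : Int) - 1
  -- for i in range(num_digits + 1): output += bin_digits[i] * 10 ** (num_digits - i)
  -- index i is always in range, so pyGetD with default 0 is exact; the exponent num_digits - i
  -- is nonnegative throughout the range, so .toNat is exact (Python's ** stays integral here).
  let output : Int :=
    (PySem.List.pyRange 0 (num_digits + 1) 1).foldl
      (fun acc i => acc + PySem.List.pyGetD bin_digits i 0 * 10 ^ (num_digits - i).toNat) 0
  PySem.Int.toStr output

-- ===== PORT B =====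
def pvLoopB (b : Int) : Nat → Int → Int → Int → Int
  | 0, _, output, _ => output
  | fuel + 1, num, output, place =>
    if num > 0 then pvLoopB b fuel (Int.fdiv num b) (output + Int.fmod num b * place) (place * 10)
    else output

def convert_int_to_form_alt (num : Int) (form_num : Int) : String :=
  PySem.Int.toStr (pvLoopB form_num (num.toNat + 1) num 0 1)

-- ===== PRECONDITION & SPEC =====
-- Pre_ excludes only inputs where Python A does not return: with num > 0, form_num = 0 raises
-- ZeroDivisionError and form_num = 1 loops forever (B behaves identically there).
def Pre_convert_int_to_form (num : Int) (form_num : Int) : Prop :=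
  num ≤ 0 ∨ (form_num ≠ 0 ∧ form_num ≠ 1)
instance (num : Int) (form_num : Int) : Decidable (Pre_convert_int_to_form num form_num) := by
  unfold Pre_convert_int_to_form; infer_instance

def pvWitness_convert_int_to_form : Int × Int := (13, 2)

def Spec_convert_int_to_form (num : Int) (form_num : Int) (out : String) : Prop := out = convert_int_to_form_alt num form_num
instance (num : Int) (form_num : Int) (out : String) : Decidable (Spec_convert_int_to_form num form_num out) := by unfold Spec_convert_int_to_form; infer_instance

-- ===== CLAIM (what is proved, stated in full; the proofs are below) =====
def Claim_equal_convert_int_to_form : Prop := ∀ (num : Int) (form_num : Int), Dom_convert_int_to_form num form_num → Pre_convert_int_to_form num form_num → Spec_convert_int_to_form num form_num (convert_int_to_form num form_num)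

-- ===== LEMMAS AND PROOFS =====

-- digits of num, least-significant first, as both loops generate them
def pvDigs (b : Int) : Nat → Int → List Int
  | 0, _ => []
  | fuel + 1, num => if num > 0 then Int.fmod num b :: pvDigs b fuel (Int.fdiv num b) else []

-- value of a least-significant-first digit list
def pvEvalLSB (l : List Int) : Int := l.foldr (fun d a => d + 10 * a) 0

lemma pvLoopA_eq (b : Int) : ∀ (fuel : Nat) (num : Int) (lst : List Int),
    pvLoopA b fuel num lst = (pvDigs b fuel num).reverse ++ lst := by
  intro fuel
  induction fuel with
  | zero => intro num lst; simp [pvLoopA, pvDigs]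
  | succ f ih =>
    intro num lst
    simp only [pvLoopA, pvDigs]
    split
    · rw [ih]; simp
    · simp

lemma pvLoopB_eq (b : Int) : ∀ (fuel : Nat) (num output place : Int),
    pvLoopB b fuel num output place = output + place * pvEvalLSB (pvDigs b fuel num) := by
  intro fuel
  induction fuel with
  | zero => intro num output place; simp [pvLoopB, pvDigs, pvEvalLSB]
  | succ f ih =>
    intro num output place
    simp only [pvLoopB, pvDigs]
    split
    · rw [ih]; simp [pvEvalLSB]; ring
    · simp [pvEvalLSB]

-- pure-Nat core: the weighted sum over indices is the most-significant-first fold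
lemma pvCore (t : List Int) :
    ((List.range t.length).map (fun k => t.getD k 0 * 10 ^ (t.length - 1 - k))).sum
      = t.foldl (fun a d => a * 10 + d) 0 := by
  induction t using List.reverseRecOn with
  | nil => simp
  | append_singleton t d ih =>
    simp only [List.length_append, List.length_cons, List.length_nil, List.range_succ,
      List.map_append, List.sum_append, List.foldl_append, List.foldl_cons, List.foldl_nil]
    have hlast : (t ++ [d]).getD t.length 0 = d := by
      rw [List.getD_append_right t [d] 0 t.length (le_refl t.length)]
      simp
    have hmap : (List.range t.length).map
        (fun k => (t ++ [d]).getD k 0 * 10 ^ (t.length + 1 - 1 - k))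
        = (List.range t.length).map (fun k => 10 * (t.getD k 0 * 10 ^ (t.length - 1 - k))) := by
      apply List.map_congr_left
      intro k hk
      rw [List.mem_range] at hk
      rw [List.getD_append t [d] 0 k hk]
      have h1 : t.length + 1 - 1 - k = (t.length - 1 - k) + 1 := by omega
      rw [h1, pow_succ]
      ring
    rw [hmap, List.sum_map_mul_left, ih]
    simp only [List.map_cons, List.map_nil, List.sum_cons, List.sum_nil]
    rw [hlast]
    have he : t.length + (0 + 1) - 1 - t.length = 0 := by omega
    rw [he, pow_zero]
    ring

lemma pvFoldlAdd (g : Int → Int) : ∀ (l : List Int) (a : Int),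
    l.foldl (fun acc x => acc + g x) a = a + (l.map g).sum := by
  intro l
  induction l with
  | nil => intro a; simp
  | cons x t ih =>
    intro a
    simp only [List.foldl_cons, List.map_cons, List.sum_cons]
    rw [ih]
    ring

-- A's second loop computes the most-significant-first value of the digit list
lemma pvSumA_eq (lst : List Int) :
    (PySem.List.pyRange 0 ((lst.length : Int) - 1 + 1) 1).foldl
      (fun acc i => acc + PySem.List.pyGetD lst i 0 * 10 ^ ((lst.length : Int) - 1 - i).toNat) 0
      = lst.foldl (fun a d => a * 10 + d) 0 := by
  have hL : ((lst.length : Int) - 1 + 1) = (lst.length : Int) := by ring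
  rw [hL, pvFoldlAdd (fun i => PySem.List.pyGetD lst i 0 * 10 ^ ((lst.length : Int) - 1 - i).toNat),
    PySem.List.pyRange_one, List.map_map]
  have hn : ((lst.length : Int) - 0).toNat = lst.length := by omega
  rw [hn]
  have hmap : List.map
      ((fun i => PySem.List.pyGetD lst i 0 * 10 ^ ((lst.length : Int) - 1 - i).toNat) ∘ fun k => (0 : Int) + ↑k)
      (List.range lst.length)
      = List.map (fun k => lst.getD k 0 * 10 ^ (lst.length - 1 - k)) (List.range lst.length) := by
    apply List.map_congr_left
    intro k hk
    rw [List.mem_range] at hk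
    simp only [Function.comp_apply, zero_add, PySem.List.pyGetD_natCast]
    congr 1
    congr 1
    omega
  rw [hmap, pvCore]
  ring

lemma pvMSB_eq_LSB_rev (lst : List Int) :
    lst.foldl (fun a d => a * 10 + d) 0 = pvEvalLSB lst.reverse := by
  have h : ∀ (l : List Int) (a : Int),
      l.foldl (fun a d => a * 10 + d) a = l.foldl (fun a d => d + 10 * a) a := by
    intro l
    induction l with
    | nil => intro a; rfl
    | cons d t ih =>
      intro a
      simp only [List.foldl_cons]
      rw [ih]
      congr 1
      ring
  unfold pvEvalLSB
  rw [List.foldr_reverse]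
  exact h lst 0

-- ===== VERDICT (by name: the statement is the Claim_ definition above) =====
theorem convert_int_to_form_spec : Claim_equal_convert_int_to_form := by
  intro num form_num _ _
  unfold Spec_convert_int_to_form convert_int_to_form convert_int_to_form_alt
  rw [pvLoopA_eq, pvLoopB_eq]
  simp only [List.append_nil]
  rw [pvSumA_eq, pvMSB_eq_LSB_rev]
  simp
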